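-- pv_equiv track=rewrite | github.com/suyin445/chessin5d_python | chessin5d.py | axis_choose
-- ===== SOURCE A (Python) =====
-- def axis_choose(axis_num):
--     numlist = []
--     for i in range(80):
--         axis_count = 0
--         list = [i + 1, 0, 0, 0]
--         list[1], list[0] = divmod(list[0], 3)
--         list[2], list[1] = divmod(list[1], 3)
--         list[3], list[2] = divmod(list[2], 3)
--         list = [j - 1 for j in list]
--         for k in list:
--             if k != 0:
--                 axis_count += 1
--         if axis_count in axis_num:
--             numlist.append(list)
--     return numlist
-- ===== SOURCE B (Python) =====
-- def axis_choose(axis_num):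
--     numlist = []
--     for d3 in range(3):
--         for d2 in range(3):
--             for d1 in range(3):
--                 for d0 in range(3):
--                     if d0 == 0 and d1 == 0 and d2 == 0 and d3 == 0:
--                         continue
--                     vec = [d0 - 1, d1 - 1, d2 - 1, d3 - 1]
--                     if sum(x != 0 for x in vec) in axis_num:
--                         numlist.append(vec)
--     return numlist
-- ===== Notes on version B (the rewrite author's own statement) =====
-- stated objective: idiomatic
-- what changed: B enumerates the base-3 digit vectors directly with four nested range(3) loops (skipping the all-zero tuple) instead of decoding each i+1 via a divmod chain.
import Mathlib
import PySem

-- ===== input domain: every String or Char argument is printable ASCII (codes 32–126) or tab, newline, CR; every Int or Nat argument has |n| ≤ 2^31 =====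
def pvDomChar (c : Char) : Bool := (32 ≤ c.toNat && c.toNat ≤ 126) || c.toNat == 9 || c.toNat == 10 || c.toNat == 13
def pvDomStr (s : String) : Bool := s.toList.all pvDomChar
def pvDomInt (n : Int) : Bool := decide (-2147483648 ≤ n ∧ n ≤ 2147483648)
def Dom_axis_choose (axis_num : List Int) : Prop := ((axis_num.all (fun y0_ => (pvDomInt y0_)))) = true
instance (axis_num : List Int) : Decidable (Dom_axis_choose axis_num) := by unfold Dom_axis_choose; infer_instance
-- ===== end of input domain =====

-- B enumerates the base-3 digit vectors by four nested range(3) loops (skipping the all-zero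
-- tuple) instead of A's per-index divmod decoding chain: idiomatic, same cost.

-- ===== PORT A =====
def axis_choose (axis_num : List Int) : List (List Int) :=
  (PySem.List.pyRange 0 80 1).foldl (fun numlist i =>
    let l0 := i + 1
    -- list[1], list[0] = divmod(list[0], 3)
    let l1 := PySem.Int.floordiv l0 3
    let l0 := PySem.Int.mod l0 3
    -- list[2], list[1] = divmod(list[1], 3)
    let l2 := PySem.Int.floordiv l1 3
    let l1 := PySem.Int.mod l1 3
    -- list[3], list[2] = divmod(list[2], 3)
    let l3 := PySem.Int.floordiv l2 3
    let l2 := PySem.Int.mod l2 3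
    let lst := [l0 - 1, l1 - 1, l2 - 1, l3 - 1]
    let axis_count := lst.foldl (fun acc k => if k ≠ 0 then acc + 1 else acc) (0 : Int)
    if axis_count ∈ axis_num then numlist ++ [lst] else numlist) []

-- ===== PORT B =====
def axis_choose_alt (axis_num : List Int) : List (List Int) :=
  (PySem.List.pyRange 0 3 1).foldl (fun acc d3 =>
    (PySem.List.pyRange 0 3 1).foldl (fun acc d2 =>
      (PySem.List.pyRange 0 3 1).foldl (fun acc d1 =>
        (PySem.List.pyRange 0 3 1).foldl (fun acc d0 =>
          if d0 = 0 ∧ d1 = 0 ∧ d2 = 0 ∧ d3 = 0 then acc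
          else
            let vec := [d0 - 1, d1 - 1, d2 - 1, d3 - 1]
            if (vec.map (fun x => if x ≠ 0 then (1 : Int) else 0)).sum ∈ axis_num
            then acc ++ [vec] else acc) acc) acc) acc) []

-- ===== PRECONDITION & SPEC =====
def Spec_axis_choose (axis_num : List Int) (out : List (List Int)) : Prop := out = axis_choose_alt axis_num
instance (axis_num : List Int) (out : List (List Int)) : Decidable (Spec_axis_choose axis_num out) := by unfold Spec_axis_choose; infer_instance

-- ===== CLAIM (what is proved, stated in full; the proofs are below) =====
def Claim_equal_axis_choose : Prop := ∀ (axis_num : List Int), Dom_axis_choose axis_num → Spec_axis_choose axis_num (axis_choose axis_num)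

-- ===== LEMMAS AND PROOFS =====

-- the (vector, nonzero-count) pair A computes at loop index i
def pvFA (i : Int) : List Int × Int :=
  let l0 := i + 1
  let l1 := PySem.Int.floordiv l0 3
  let l0 := PySem.Int.mod l0 3
  let l2 := PySem.Int.floordiv l1 3
  let l1 := PySem.Int.mod l1 3
  let l3 := PySem.Int.floordiv l2 3
  let l2 := PySem.Int.mod l2 3
  let lst := [l0 - 1, l1 - 1, l2 - 1, l3 - 1]
  (lst, lst.foldl (fun acc k => if k ≠ 0 then acc + 1 else acc) (0 : Int))

-- the (vector, nonzero-count) contribution of B's innermost loop body (empty on the skip)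
def pvGB (d3 d2 d1 d0 : Int) : List (List Int × Int) :=
  if d0 = 0 ∧ d1 = 0 ∧ d2 = 0 ∧ d3 = 0 then []
  else [([d0 - 1, d1 - 1, d2 - 1, d3 - 1],
         ([d0 - 1, d1 - 1, d2 - 1, d3 - 1].map (fun x => if x ≠ 0 then (1 : Int) else 0)).sum)]

-- keep the vectors whose count is in ax
def pvSel (ax : List Int) (xs : List (List Int × Int)) : List (List Int) :=
  xs.flatMap (fun p => if p.2 ∈ ax then [p.1] else [])

def pvTabA : List (List Int × Int) := (PySem.List.pyRange 0 80 1).map pvFA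

def pvTabB : List (List Int × Int) :=
  (PySem.List.pyRange 0 3 1).flatMap (fun d3 =>
    (PySem.List.pyRange 0 3 1).flatMap (fun d2 =>
      (PySem.List.pyRange 0 3 1).flatMap (fun d1 =>
        (PySem.List.pyRange 0 3 1).flatMap (fun d0 => pvGB d3 d2 d1 d0))))

lemma pvFoldl_if_mem_append (ax : List Int) (f : Int → List Int × Int)
    (l : List Int) (init : List (List Int)) :
    l.foldl (fun acc i => if (f i).2 ∈ ax then acc ++ [(f i).1] else acc) init
      = init ++ pvSel ax (l.map f) := by
  induction l generalizing init with
  | nil => simp [pvSel]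
  | cons x t ih =>
      simp only [List.foldl_cons, List.map_cons, pvSel, List.flatMap_cons, ih]
      split_ifs <;> simp

lemma pvSel_flatMap {α : Type} (ax : List Int) (l : List α) (f : α → List (List Int × Int)) :
    pvSel ax (l.flatMap f) = l.flatMap (fun x => pvSel ax (f x)) := by
  simp [pvSel, List.flatMap_assoc]

lemma pvB_leaf (ax : List Int) (d3 d2 d1 : Int) (l : List Int) (init : List (List Int)) :
    l.foldl (fun acc d0 =>
        if d0 = 0 ∧ d1 = 0 ∧ d2 = 0 ∧ d3 = 0 then acc
        else
          let vec := [d0 - 1, d1 - 1, d2 - 1, d3 - 1]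
          if (vec.map (fun x => if x ≠ 0 then (1 : Int) else 0)).sum ∈ ax
          then acc ++ [vec] else acc) init
      = init ++ l.flatMap (fun d0 => pvSel ax (pvGB d3 d2 d1 d0)) := by
  induction l generalizing init with
  | nil => simp
  | cons x t ih =>
      simp only [List.foldl_cons, List.flatMap_cons, ih]
      by_cases hz : x = 0 ∧ d1 = 0 ∧ d2 = 0 ∧ d3 = 0
      · simp [hz, pvGB, pvSel]
      · simp only [if_neg hz, pvGB, pvSel, List.flatMap_cons, List.flatMap_nil]
        split_ifs <;> simp

lemma pvA_eq (ax : List Int) : axis_choose ax = pvSel ax pvTabA := by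
  unfold axis_choose
  exact (pvFoldl_if_mem_append ax pvFA (PySem.List.pyRange 0 80 1) []).trans (by simp [pvTabA])

lemma pvB_eq (ax : List Int) : axis_choose_alt ax = pvSel ax pvTabB := by
  unfold axis_choose_alt
  simp only [pvB_leaf, PySem.List.foldl_append_eq_flatMap, List.nil_append]
  simp only [pvTabB, pvSel_flatMap]

lemma pvTab_eq : pvTabA = pvTabB := by decide

-- ===== VERDICT (by name: the statement is the Claim_ definition above) =====
theorem axis_choose_spec : Claim_equal_axis_choose := by
  intro ax _
  unfold Spec_axis_choose
  rw [pvA_eq, pvB_eq, pvTab_eq]
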